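-- pv_equiv track=rewrite | github.com/amrak07/flames | app.py | get_relationship
-- ===== SOURCE A (Python) =====
-- def get_relationship(name1, name2):
--     name1 = list(name1.replace(" ", "").lower())
--     name2 = list(name2.replace(" ", "").lower())
--     for i in name2:
--         if not i in name1:
--             name1.append(i)
--         else:
--             name1.remove(i)
--     total_letters = len(name1)
--     flames = ["Friends", "Love", "Affection", "Marriage", "Enemy", "Sibling"]
--     while len(flames) > 1:
--         index = total_letters % len(flames) - 1
--         if index >= 0:
--             flames = flames[index + 1:] + flames[:index]
--         else:
--             flames = flames[:len(flames) - 1]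
--     return flames[0]
-- ===== SOURCE B (Python) =====
-- def get_relationship(name1, name2):
--     name1 = list(name1.replace(" ", "").lower())
--     name2 = list(name2.replace(" ", "").lower())
--     for i in name2:
--         if not i in name1:
--             name1.append(i)
--         else:
--             name1.remove(i)
--     total_letters = len(name1)
--     flames = ["Friends", "Love", "Affection", "Marriage", "Enemy", "Sibling"]
--     pos = 0
--     for m in range(2, 7):
--         pos = (pos + total_letters) % m
--     return flames[pos]
-- ===== Notes on version B (the rewrite author's own statement) =====
-- stated objective: simpler
-- what changed: Phase 2's circular elimination-by-list-slicing while-loop is replaced by the closed-form Josephus recurrence pos = (pos + total_letters) % m for m = 2..6, indexing the fixed 6-element FLAMES list once.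
import Mathlib
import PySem

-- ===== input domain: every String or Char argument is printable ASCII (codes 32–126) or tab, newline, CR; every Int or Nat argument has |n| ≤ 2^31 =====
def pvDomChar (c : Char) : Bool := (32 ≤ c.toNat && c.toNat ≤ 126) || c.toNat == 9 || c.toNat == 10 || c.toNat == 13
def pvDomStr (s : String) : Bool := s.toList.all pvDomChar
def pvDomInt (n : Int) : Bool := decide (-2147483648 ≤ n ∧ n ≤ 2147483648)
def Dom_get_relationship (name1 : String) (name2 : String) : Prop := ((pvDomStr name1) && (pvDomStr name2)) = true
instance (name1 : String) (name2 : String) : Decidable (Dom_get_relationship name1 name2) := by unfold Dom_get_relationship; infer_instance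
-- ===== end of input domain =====

-- B keeps A's letter-toggling phase and replaces the circular elimination-by-slicing
-- while-loop by the closed-form Josephus recurrence pos = (pos + total) % m, m = 2..6 (objective: simpler).

-- ===== PORT A =====
-- list(name1.replace(" ", "").lower()) and the toggle loop 'for i in name2: …'
-- name1.remove(i) is only executed when 'i in name1', so remove? is always 'some'; getD is unreachable.
def pvLettersA (name1 : String) (name2 : String) : List Char :=
  let l1 := (PySem.Str.lower (PySem.Str.replace name1 " " "")).toList
  let l2 := (PySem.Str.lower (PySem.Str.replace name2 " " "")).toList
  l2.foldl (fun acc i => if ¬ (i ∈ acc) then acc ++ [i] else (PySem.List.remove? acc i).getD acc) l1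

-- 'while len(flames) > 1: …'; each pass shrinks flames by exactly one element, so a fuel of
-- flames.length (6) is enough; the fuel only makes the same computation total.
def pvFlamesLoopA : Nat → Int → List String → List String
  | 0, _, flames => flames
  | fuel + 1, total, flames =>
    if 1 < flames.length then
      let index : Int := PySem.Int.mod total (flames.length : Int) - 1
      if 0 ≤ index then
        pvFlamesLoopA fuel total
          (PySem.List.slice flames (some (index + 1)) none ++ PySem.List.slice flames none (some index))
      else
        pvFlamesLoopA fuel total (PySem.List.slice flames none (some ((flames.length : Int) - 1)))
    else flames

def get_relationship (name1 : String) (name2 : String) : String :=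
  let total : Int := ((pvLettersA name1 name2).length : Int)
  let flames := ["Friends", "Love", "Affection", "Marriage", "Enemy", "Sibling"]
  -- flames[0]; the loop always ends with a one-element list, so getD "" is unreachable
  (PySem.List.pyGet? (pvFlamesLoopA flames.length total flames) 0).getD ""

-- ===== PORT B =====
-- identical Phase-1 toggle loop (Source B keeps it verbatim)
def pvLettersB (name1 : String) (name2 : String) : List Char :=
  let l1 := (PySem.Str.lower (PySem.Str.replace name1 " " "")).toList
  let l2 := (PySem.Str.lower (PySem.Str.replace name2 " " "")).toList
  l2.foldl (fun acc i => if ¬ (i ∈ acc) then acc ++ [i] else (PySem.List.remove? acc i).getD acc) l1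

def get_relationship_alt (name1 : String) (name2 : String) : String :=
  let total : Int := ((pvLettersB name1 name2).length : Int)
  let flames := ["Friends", "Love", "Affection", "Marriage", "Enemy", "Sibling"]
  let pos : Int := (PySem.List.pyRange 2 7 1).foldl (fun pos m => PySem.Int.mod (pos + total) m) 0
  -- flames[pos]; 0 ≤ pos < 6 always, so getD "" is unreachable
  (PySem.List.pyGet? flames pos).getD ""

-- ===== PRECONDITION & SPEC =====
def Spec_get_relationship (name1 : String) (name2 : String) (out : String) : Prop := out = get_relationship_alt name1 name2
instance (name1 : String) (name2 : String) (out : String) : Decidable (Spec_get_relationship name1 name2 out) := by unfold Spec_get_relationship; infer_instance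

-- ===== CLAIM (what is proved, stated in full; the proofs are below) =====
def Claim_equal_get_relationship : Prop := ∀ (name1 : String) (name2 : String), Dom_get_relationship name1 name2 → Spec_get_relationship name1 name2 (get_relationship name1 name2)

-- ===== LEMMAS AND PROOFS =====

theorem pvLetters_eq (name1 name2 : String) : pvLettersA name1 name2 = pvLettersB name1 name2 := rfl

-- A's elimination loop depends on total only through total % 60 (every intermediate length 2..6 divides 60)
theorem pvFlamesLoopA_mod (fuel : Nat) (n : Nat) (flames : List String) (hlen : flames.length ≤ 6) :
    pvFlamesLoopA fuel (n : Int) flames = pvFlamesLoopA fuel ((n % 60 : Nat) : Int) flames := by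
  induction fuel generalizing flames with
  | zero => rfl
  | succ fuel ih =>
    by_cases h : 1 < flames.length
    · have hdvd : flames.length ∣ 60 := by
        interval_cases h : flames.length <;> decide
      have hmod : PySem.Int.mod (n : Int) (flames.length : Int)
          = PySem.Int.mod ((n % 60 : Nat) : Int) (flames.length : Int) := by
        have hd : ((flames.length : Int)) ∣ 60 := by exact_mod_cast Int.natCast_dvd_natCast.mpr hdvd
        simp only [PySem.Int.mod, Int.fmod_eq_emod]
        have h60 : ((n % 60 : Nat) : Int) = (n : Int) % 60 := by push_cast; rfl
        simp [h60, Int.emod_emod_of_dvd _ hd]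
      simp only [pvFlamesLoopA, h, if_true, hmod]
      set index : Int := PySem.Int.mod ((n % 60 : Nat) : Int) (flames.length : Int) - 1 with hidx
      by_cases hpos : 0 ≤ index
      · simp only [hpos, if_true]
        apply ih
        have hnn : (0 : Int) ≤ index + 1 := by omega
        have hub : index + 1 ≤ (flames.length : Int) := by
          have h1 : ((n % 60 : Nat) : Int) % (flames.length : Int) < (flames.length : Int) := by
            apply Int.emod_lt_of_pos; omega
          have h2 : PySem.Int.mod ((n % 60 : Nat) : Int) (flames.length : Int)
              = ((n % 60 : Nat) : Int) % (flames.length : Int) := by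
            simp [PySem.Int.mod, Int.fmod_eq_emod]
          omega
        rw [PySem.List.slice_from flames hnn, PySem.List.slice_to flames hpos]
        simp only [List.length_append, List.length_drop, List.length_take]
        omega
      · simp only [hpos, if_false]
        apply ih
        rw [PySem.List.slice_to flames (by omega : (0:Int) ≤ (flames.length : Int) - 1)]
        simp only [List.length_take]
        omega
    · simp only [pvFlamesLoopA, h, if_false]

-- B's Josephus position depends on total only through total % 60
theorem pvPosB_mod (n : Nat) :
    (PySem.List.pyRange 2 7 1).foldl (fun pos m => PySem.Int.mod (pos + (n : Int)) m) 0
      = (PySem.List.pyRange 2 7 1).foldl (fun pos m => PySem.Int.mod (pos + ((n % 60 : Nat) : Int)) m) 0 := by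
  have key : ∀ (m : Int), m ∣ 60 → ∀ x : Int,
      (x + (n : Int)) % m = (x + ((n : Int) % 60)) % m := by
    intro m hm x
    rw [Int.add_emod, Int.add_emod x ((n : Int) % 60), Int.emod_emod_of_dvd _ hm]
  have hr : PySem.List.pyRange 2 7 1 = [2, 3, 4, 5, 6] := by decide
  have h60 : ((n % 60 : Nat) : Int) = (n : Int) % 60 := by push_cast; rfl
  rw [hr]
  simp only [List.foldl, PySem.Int.mod, Int.fmod_eq_emod, h60]
  norm_num
  rw [key 6 (by norm_num), key 5 (by norm_num), key 4 (by norm_num),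
    key 3 (by norm_num)]

-- the two phase-2 computations agree for every residue below 60
theorem pvKey : ∀ k : Nat, k < 60 →
    (PySem.List.pyGet? (pvFlamesLoopA 6 (k : Int)
        ["Friends", "Love", "Affection", "Marriage", "Enemy", "Sibling"]) 0).getD ""
      = (PySem.List.pyGet? ["Friends", "Love", "Affection", "Marriage", "Enemy", "Sibling"]
          ((PySem.List.pyRange 2 7 1).foldl (fun pos m => PySem.Int.mod (pos + (k : Int)) m) 0)).getD "" := by
  decide

-- ===== VERDICT (by name: the statement is the Claim_ definition above) =====
theorem get_relationship_spec : Claim_equal_get_relationship := by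
  intro name1 name2 _
  unfold Spec_get_relationship get_relationship get_relationship_alt
  rw [pvLetters_eq]
  set n := (pvLettersB name1 name2).length with hn
  simp only [List.length_cons, List.length_nil]
  rw [pvFlamesLoopA_mod 6 n _ (by simp), pvPosB_mod n]
  exact pvKey (n % 60) (Nat.mod_lt _ (by omega))
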